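-- pv_equiv track=rewrite | github.com/laps15/aoc | 24/src/15.py | move_large_box_horizontally
-- ===== SOURCE A (Python) =====
-- def is_box(item):
--    return item == '[' or item == ']'
--
-- def move_large_box_horizontally(graph, r_pos, move):
--     initial_target = (r_pos[0] + move[0], r_pos[1] + move[1])
--     target = initial_target
--
--     while is_box(graph[target[0]][target[1]]):
--         target = (target[0] + move[0], target[1] + move[1])
--
--     if graph[target[0]][target[1]] == '#':
--         return graph, r_pos
--
--     destination = target
--     source = (destination[0]-move[0], destination[1]-move[1])
--     while source[1] != r_pos[1]:
--         graph[destination[0]][destination[1]] = graph[source[0]][source[1]]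
--
--         destination = source
--         source = (source[0]-move[0], source[1]-move[1])
--
--     graph[destination[0]][destination[1]] = graph[source[0]][source[1]]
--     graph[r_pos[0]][r_pos[1]] = '.'
--
--     return graph, destination
-- ===== SOURCE B (Python) =====
-- # Recursive single-pass push: no scan-then-shift phases; each object is moved onto the
-- # next cell while the recursion unwinds. Like A it mutates graph in place; the
-- # equivalence proved is about the return value.
-- def is_box(item):
--     return item == '[' or item == ']'
--
-- def _push(graph, pos, move):
--     """Move the object at pos one step in direction move, recursively pushing
--     whatever box occupies the destination first; cell pos becomes '.'.
--     Returns True on success, False (no mutation) if the chain ends at a wall."""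
--     nxt = (pos[0] + move[0], pos[1] + move[1])
--     cell = graph[nxt[0]][nxt[1]]
--     if cell == '#':
--         return False
--     if is_box(cell) and not _push(graph, nxt, move):
--         return False
--     graph[nxt[0]][nxt[1]] = graph[pos[0]][pos[1]]
--     graph[pos[0]][pos[1]] = '.'
--     return True
--
-- def move_large_box_horizontally(graph, r_pos, move):
--     if _push(graph, r_pos, move):
--         return graph, (r_pos[0] + move[0], r_pos[1] + move[1])
--     return graph, r_pos
-- ===== Notes on version B (the rewrite author's own statement) =====
-- stated objective: alternative
-- what changed: A is an iterative two-phase algorithm (scan forward to find the free cell, then a backward pointer-walking copy loop); B replaces both phases with one recursive function that pushes the object at a cell onto the next cell, recursively freeing that cell first, with the writes happening as the recursion unwinds and failure (wall) propagating up before any mutation.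
import Mathlib
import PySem

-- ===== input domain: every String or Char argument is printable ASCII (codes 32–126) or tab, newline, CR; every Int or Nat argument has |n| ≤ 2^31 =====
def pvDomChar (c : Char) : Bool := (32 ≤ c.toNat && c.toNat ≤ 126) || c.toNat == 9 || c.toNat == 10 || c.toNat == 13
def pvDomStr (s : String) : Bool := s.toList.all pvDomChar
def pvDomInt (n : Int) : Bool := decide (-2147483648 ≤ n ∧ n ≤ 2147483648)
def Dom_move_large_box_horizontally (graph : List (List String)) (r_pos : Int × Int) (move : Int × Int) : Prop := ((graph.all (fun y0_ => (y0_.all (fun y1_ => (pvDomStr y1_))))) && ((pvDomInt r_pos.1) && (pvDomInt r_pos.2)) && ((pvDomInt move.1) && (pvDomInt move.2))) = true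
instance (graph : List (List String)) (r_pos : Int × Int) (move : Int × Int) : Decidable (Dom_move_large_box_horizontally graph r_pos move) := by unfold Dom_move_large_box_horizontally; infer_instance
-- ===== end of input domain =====

-- B replaces A's two iterative phases (forward scan, backward copy loop) by a single recursive
-- push that moves each object onto the next cell while the recursion unwinds (objective:
-- alternative decomposition, same cost). Like A, the Python B mutates graph in place; the
-- equivalence proved here is about the return value.

-- ===== PORT A =====
def is_box (item : String) : Bool := item == "[" || item == "]"

-- fuel for the while-loops (termination artifact only: at most one step per grid cell plus slack)
def pvFuelA (g : List (List String)) : Nat := g.flatten.length + g.length + 1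

-- graph[p0][p1], total form; Pre_ keeps every touched index in range
def pvCellA (g : List (List String)) (p : Int × Int) : String :=
  PySem.List.pyGetD (PySem.List.pyGetD g p.1 []) p.2 ""

-- graph[p0][p1] = v
def pvSetA (g : List (List String)) (p : Int × Int) (v : String) : List (List String) :=
  PySem.List.pySetD g p.1 (PySem.List.pySetD (PySem.List.pyGetD g p.1 []) p.2 v)

-- while is_box(graph[target[0]][target[1]]): target += move
def pvScanA (g : List (List String)) (move : Int × Int) : Nat → Int × Int → Int × Int
  | 0, t => t
  | f + 1, t => if is_box (pvCellA g t) then pvScanA g move f (t.1 + move.1, t.2 + move.2) else t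

-- while source[1] != r_pos[1]: graph[dest] = graph[source]; dest, source = source, source - move
def pvBackA (move : Int × Int) (rcol : Int) :
    Nat → List (List String) → Int × Int → Int × Int → List (List String) × ((Int × Int) × (Int × Int))
  | 0, g, dest, src => (g, (dest, src))
  | f + 1, g, dest, src =>
      if src.2 ≠ rcol then
        pvBackA move rcol f (pvSetA g dest (pvCellA g src)) src (src.1 - move.1, src.2 - move.2)
      else (g, (dest, src))

def move_large_box_horizontally (graph : List (List String)) (r_pos : Int × Int) (move : Int × Int) :
    List (List String) × (Int × Int) :=
  let initial_target := (r_pos.1 + move.1, r_pos.2 + move.2)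
  let target := pvScanA graph move (pvFuelA graph) initial_target
  if pvCellA graph target == "#" then (graph, r_pos)
  else
    let destination := target
    let source := (destination.1 - move.1, destination.2 - move.2)
    let res := pvBackA move r_pos.2 (pvFuelA graph) graph destination source
    let g2 := pvSetA res.1 res.2.1 (pvCellA res.1 res.2.2)
    let g3 := pvSetA g2 r_pos "."
    (g3, res.2.1)

-- ===== PORT B =====
def is_box_alt (item : String) : Bool := item == "[" || item == "]"

-- fuel for the recursion (termination artifact only: at most one level per grid cell plus slack)
def pvFuelB (g : List (List String)) : Nat := g.flatten.length + g.length + 1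

def pvCellB (g : List (List String)) (p : Int × Int) : String :=
  PySem.List.pyGetD (PySem.List.pyGetD g p.1 []) p.2 ""

def pvSetB (g : List (List String)) (p : Int × Int) (v : String) : List (List String) :=
  PySem.List.pySetD g p.1 (PySem.List.pySetD (PySem.List.pyGetD g p.1 []) p.2 v)

-- def _push(graph, pos, move): recursively free the next cell, then move this object onto it
def pvPushB (move : Int × Int) : Nat → List (List String) → Int × Int → List (List String) × Bool
  | 0, g, _ => (g, false)
  | f + 1, g, pos =>
      let nxt := (pos.1 + move.1, pos.2 + move.2)
      let cell := pvCellB g nxt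
      if cell == "#" then (g, false)
      else if is_box_alt cell then
        let r := pvPushB move f g nxt
        if r.2 then
          let g1 := pvSetB r.1 nxt (pvCellB r.1 pos)
          (pvSetB g1 pos ".", true)
        else r
      else
        let g1 := pvSetB g nxt (pvCellB g pos)
        (pvSetB g1 pos ".", true)

def move_large_box_horizontally_alt (graph : List (List String)) (r_pos : Int × Int) (move : Int × Int) :
    List (List String) × (Int × Int) :=
  let r := pvPushB move (pvFuelB graph) graph r_pos
  if r.2 then (r.1, (r_pos.1 + move.1, r_pos.2 + move.2)) else (r.1, r_pos)

-- ===== PRECONDITION & SPEC =====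
-- Pre_ restricts to the function's natural domain: the target cell one move away is free or a
-- wall (both programs do the same immediate step), or the scan over the box chain ends at a wall
-- (both return the grid unchanged), or the move is a horizontal push of a box chain with every
-- touched index non-negative and in bounds.  On other inputs A raises IndexError, loops forever,
-- or returns via accidents of its implementation (vertical and mixed moves that shift a box
-- chain, where A's column-only loop guard shifts only one cell, and negative in-range indices on
-- a shifted box chain, which Python wraps around).
def PreImm_move_large_box_horizontally (graph : List (List String)) (r_pos : Int × Int) (move : Int × Int) : Prop :=
  -((graph.length : Int)) ≤ r_pos.1 + move.1 ∧ r_pos.1 + move.1 < (graph.length : Int) ∧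
  -(((PySem.List.pyGetD graph (r_pos.1 + move.1) []).length : Int)) ≤ r_pos.2 + move.2 ∧
  r_pos.2 + move.2 < ((PySem.List.pyGetD graph (r_pos.1 + move.1) []).length : Int) ∧
  ¬(PySem.List.pyGetD (PySem.List.pyGetD graph (r_pos.1 + move.1) []) (r_pos.2 + move.2) "" = "[" ∨
    PySem.List.pyGetD (PySem.List.pyGetD graph (r_pos.1 + move.1) []) (r_pos.2 + move.2) "" = "]") ∧
  (PySem.List.pyGetD (PySem.List.pyGetD graph (r_pos.1 + move.1) []) (r_pos.2 + move.2) "" = "#" ∨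
   (-((graph.length : Int)) ≤ r_pos.1 ∧ r_pos.1 < (graph.length : Int) ∧
    -(((PySem.List.pyGetD graph r_pos.1 []).length : Int)) ≤ r_pos.2 ∧
    r_pos.2 < ((PySem.List.pyGetD graph r_pos.1 []).length : Int)))

def PreWall_move_large_box_horizontally (graph : List (List String)) (r_pos : Int × Int) (move : Int × Int) : Prop :=
  ∃ k : Nat, k < graph.flatten.length + graph.length + 1 ∧ 1 ≤ k ∧
    (∀ i : Nat, i < k → 1 ≤ i →
      (-((graph.length : Int)) ≤ r_pos.1 + (i : Int) * move.1 ∧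
       r_pos.1 + (i : Int) * move.1 < (graph.length : Int) ∧
       -(((PySem.List.pyGetD graph (r_pos.1 + (i : Int) * move.1) []).length : Int)) ≤ r_pos.2 + (i : Int) * move.2 ∧
       r_pos.2 + (i : Int) * move.2 < ((PySem.List.pyGetD graph (r_pos.1 + (i : Int) * move.1) []).length : Int) ∧
       (PySem.List.pyGetD (PySem.List.pyGetD graph (r_pos.1 + (i : Int) * move.1) []) (r_pos.2 + (i : Int) * move.2) "" = "[" ∨
        PySem.List.pyGetD (PySem.List.pyGetD graph (r_pos.1 + (i : Int) * move.1) []) (r_pos.2 + (i : Int) * move.2) "" = "]"))) ∧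
    (-((graph.length : Int)) ≤ r_pos.1 + (k : Int) * move.1 ∧
     r_pos.1 + (k : Int) * move.1 < (graph.length : Int) ∧
     -(((PySem.List.pyGetD graph (r_pos.1 + (k : Int) * move.1) []).length : Int)) ≤ r_pos.2 + (k : Int) * move.2 ∧
     r_pos.2 + (k : Int) * move.2 < ((PySem.List.pyGetD graph (r_pos.1 + (k : Int) * move.1) []).length : Int)) ∧
    PySem.List.pyGetD (PySem.List.pyGetD graph (r_pos.1 + (k : Int) * move.1) []) (r_pos.2 + (k : Int) * move.2) "" = "#"

def PreMain_move_large_box_horizontally (graph : List (List String)) (r_pos : Int × Int) (move : Int × Int) : Prop :=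
  move.1 = 0 ∧ move.2 ≠ 0 ∧
  0 ≤ r_pos.1 ∧ r_pos.1 < (graph.length : Int) ∧
  0 ≤ r_pos.2 ∧ r_pos.2 < ((graph.getD r_pos.1.toNat []).length : Int) ∧
  ∃ k : Nat, k < (graph.getD r_pos.1.toNat []).length + 1 ∧ 1 ≤ k ∧
    (∀ i : Nat, i < k → 1 ≤ i →
      0 ≤ r_pos.2 + (i : Int) * move.2 ∧
      r_pos.2 + (i : Int) * move.2 < ((graph.getD r_pos.1.toNat []).length : Int) ∧
      ((graph.getD r_pos.1.toNat []).getD (r_pos.2 + (i : Int) * move.2).toNat "" = "[" ∨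
       (graph.getD r_pos.1.toNat []).getD (r_pos.2 + (i : Int) * move.2).toNat "" = "]")) ∧
    0 ≤ r_pos.2 + (k : Int) * move.2 ∧
    r_pos.2 + (k : Int) * move.2 < ((graph.getD r_pos.1.toNat []).length : Int) ∧
    ¬((graph.getD r_pos.1.toNat []).getD (r_pos.2 + (k : Int) * move.2).toNat "" = "[" ∨
      (graph.getD r_pos.1.toNat []).getD (r_pos.2 + (k : Int) * move.2).toNat "" = "]")

def Pre_move_large_box_horizontally (graph : List (List String)) (r_pos : Int × Int) (move : Int × Int) : Prop :=
  PreImm_move_large_box_horizontally graph r_pos move ∨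
  PreWall_move_large_box_horizontally graph r_pos move ∨
  PreMain_move_large_box_horizontally graph r_pos move

instance (graph : List (List String)) (r_pos : Int × Int) (move : Int × Int) :
    Decidable (Pre_move_large_box_horizontally graph r_pos move) := by
  unfold Pre_move_large_box_horizontally
  refine @instDecidableOr _ _ ?_ (@instDecidableOr _ _ ?_ ?_)
  · unfold PreImm_move_large_box_horizontally; infer_instance
  · unfold PreWall_move_large_box_horizontally; infer_instance
  · unfold PreMain_move_large_box_horizontally; infer_instance

def pvWitness_move_large_box_horizontally : List (List String) × (Int × Int) × (Int × Int) :=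
  ([["#", "@", "[", "]", ".", "#"]], (0, 1), (0, 1))

def Spec_move_large_box_horizontally (graph : List (List String)) (r_pos : Int × Int) (move : Int × Int)
    (out : List (List String) × (Int × Int)) : Prop :=
  out = move_large_box_horizontally_alt graph r_pos move

instance (graph : List (List String)) (r_pos : Int × Int) (move : Int × Int)
    (out : List (List String) × (Int × Int)) : Decidable (Spec_move_large_box_horizontally graph r_pos move out) := by
  unfold Spec_move_large_box_horizontally; infer_instance

-- ===== CLAIM (what is proved, stated in full; the proofs are below) =====
def Claim_equal_move_large_box_horizontally : Prop :=
  ∀ (graph : List (List String)) (r_pos : Int × Int) (move : Int × Int),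
    Dom_move_large_box_horizontally graph r_pos move →
    Pre_move_large_box_horizontally graph r_pos move →
    Spec_move_large_box_horizontally graph r_pos move (move_large_box_horizontally graph r_pos move)

-- ===== LEMMAS AND PROOFS =====

-- apply a list of (column, value) writes to a row (proof helper)
def applyW (ws : List (Int × String)) (σ : List String) : List String :=
  ws.foldl (fun σ w => PySem.List.pySetD σ w.1 w.2) σ

-- row-level mirrors of A's two loops (proof helpers)
def rowScanA (ρ : List String) (d : Int) : Nat → Int → Int
  | 0, j => j
  | f + 1, j => if is_box (PySem.List.pyGetD ρ j "") then rowScanA ρ d f (j + d) else j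

def rowBack (d rcol : Int) : Nat → List String → Int → Int → List String × (Int × Int)
  | 0, σ, dest, src => (σ, (dest, src))
  | f + 1, σ, dest, src =>
      if src ≠ rcol then
        rowBack d rcol f (PySem.List.pySetD σ dest (PySem.List.pyGetD σ src "")) src (src - d)
      else (σ, (dest, src))

-- generic pyGetD/pySetD facts specialised to non-negative Int indices
theorem pv_getD_toNat (s : List String) (j : Int) (dflt : String) (hj : 0 ≤ j) :
    PySem.List.pyGetD s j dflt = s.getD j.toNat dflt := by
  have h : j = ((j.toNat : Nat) : Int) := by omega
  rw [h, PySem.List.pyGetD_natCast]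
  rw [List.getD_eq_getElem?_getD, List.getD_eq_getElem?_getD]
  congr 2

theorem pv_setD_getD_ne (s : List String) (a j : Int) (v dflt : String)
    (ha : 0 ≤ a) (hj : 0 ≤ j) (hne : a ≠ j) :
    PySem.List.pyGetD (PySem.List.pySetD s a v) j dflt = PySem.List.pyGetD s j dflt := by
  rw [PySem.List.pySetD_of_nonneg _ _ ha, pv_getD_toNat _ _ _ hj, pv_getD_toNat _ _ _ hj]
  have h : a.toNat ≠ j.toNat := by omega
  simp [List.getD_eq_getElem?_getD, List.getElem?_set_ne h]

theorem pv_setD_setD_same (s : List String) (a : Int) (v u : String) (ha : 0 ≤ a) :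
    PySem.List.pySetD (PySem.List.pySetD s a v) a u = PySem.List.pySetD s a u := by
  rw [PySem.List.pySetD_of_nonneg _ _ ha, PySem.List.pySetD_of_nonneg _ _ ha,
      PySem.List.pySetD_of_nonneg _ _ ha, List.set_set]

theorem applyW_cons (w : Int × String) (ws : List (Int × String)) (s : List String) :
    applyW (w :: ws) s = applyW ws (PySem.List.pySetD s w.1 w.2) := rfl

theorem applyW_concat (ws : List (Int × String)) (w : Int × String) (s : List String) :
    applyW (ws ++ [w]) s = PySem.List.pySetD (applyW ws s) w.1 w.2 := by
  rw [applyW, List.foldl_append]; rfl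

theorem getD_applyW_ne (ws : List (Int × String)) (s : List String) (j : Int) (dflt : String)
    (hj : 0 ≤ j) (hws : ∀ w ∈ ws, 0 ≤ w.1 ∧ w.1 ≠ j) :
    PySem.List.pyGetD (applyW ws s) j dflt = PySem.List.pyGetD s j dflt := by
  induction ws generalizing s with
  | nil => rfl
  | cons w ws ih =>
      have hw := hws w (by simp)
      rw [applyW_cons, ih _ (fun w hw' => hws w (by simp [hw'])),
          pv_setD_getD_ne s w.1 j w.2 dflt hw.1 hj hw.2]

theorem pv_key_ne (c d : Int) (hd : d ≠ 0) (i j : Nat) (h : i ≠ j) :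
    c + (i : Int) * d ≠ c + (j : Int) * d := by
  intro he
  have h1 : ((i : Int) - (j : Int)) * d = 0 := by ring_nf; linarith [he]
  rcases mul_eq_zero.mp h1 with h2 | h2
  · exact h (by exact_mod_cast sub_eq_zero.mp h2)
  · exact hd h2

theorem pv_row_le_flatten (G : List (List String)) (x : Nat) (hx : x < G.length) :
    (G.getD x []).length ≤ G.flatten.length := by
  induction G generalizing x with
  | nil => simp at hx
  | cons g gs ih =>
      cases x with
      | zero => simp
      | succ x =>
          have := ih x (by simpa using hx)
          simp only [List.getD_cons_succ, List.flatten_cons, List.length_append]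
          omega

-- A's scan characterisation (row form)
theorem scanA_char (r : List String) (c d : Int) (k : Nat) (hk : 1 ≤ k)
    (hbox : ∀ i : Nat, 1 ≤ i → i < k → is_box (PySem.List.pyGetD r (c + (i : Int) * d) "") = true)
    (htar : is_box (PySem.List.pyGetD r (c + (k : Int) * d) "") = false) :
    ∀ (f m : Nat), 1 ≤ m → m ≤ k → k - m < f →
      rowScanA r d f (c + (m : Int) * d) = c + (k : Int) * d := by
  intro f
  induction f with
  | zero => intro m _ _ h; omega
  | succ f ih =>
      intro m h1 h2 h3
      by_cases hm : m = k
      · subst hm; simp [rowScanA, htar]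
      · have hbm := hbox m h1 (by omega)
        have hstep : c + (m : Int) * d + d = c + ((m + 1 : Nat) : Int) * d := by push_cast; ring
        simp only [rowScanA, hbm, if_true, hstep]
        exact ih (m + 1) (by omega) (by omega) (by omega)

-- the backward copy loop of A: it performs the writes of the chain shift in reverse order,
-- reading only cells it has not yet written
theorem back_char (r : List String) (c d : Int) (k : Nat) (hd : d ≠ 0)
    (hnn : ∀ i : Nat, i ≤ k → 0 ≤ c + (i : Int) * d) :
    ∀ (m : Nat), 1 ≤ m → m ≤ k → ∀ (f : Nat), m ≤ f → ∀ (s : List String),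
      (∀ i : Nat, i < m → PySem.List.pyGetD s (c + (i : Int) * d) "" = PySem.List.pyGetD r (c + (i : Int) * d) "") →
      rowBack d c f s (c + (m : Int) * d) (c + ((m : Int) - 1) * d)
        = (applyW (((List.range' 1 (m - 1)).reverse).map
              (fun (i : Nat) => (c + ((i : Int) + 1) * d, PySem.List.pyGetD r (c + (i : Int) * d) ""))) s,
           (c + d, c)) := by
  intro m
  induction m with
  | zero => intro h; omega
  | succ m ih =>
      intro _ hmk f hf s hagree
      by_cases hm0 : m = 0
      · subst hm0
        have hsrc : c + (((1 : Nat) : Int) - 1) * d = c := by push_cast; ring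
        have hdst : c + ((1 : Nat) : Int) * d = c + d := by push_cast; ring
        cases f with
        | zero => simp [rowBack, applyW]
        | succ f => simp [rowBack, applyW]
      · -- m ≥ 1, so the guard fires
        have hm1 : 1 ≤ m := by omega
        obtain ⟨f, rfl⟩ : ∃ f', f = f' + 1 := ⟨f - 1, by omega⟩
        have hsrc : c + (((m + 1 : Nat) : Int) - 1) * d = c + (m : Int) * d := by push_cast; ring
        have hguard : c + (m : Int) * d ≠ c := by
          have := pv_key_ne c d hd m 0 (by omega)
          simpa using this
        have hread : PySem.List.pyGetD s (c + (m : Int) * d) "" = PySem.List.pyGetD r (c + (m : Int) * d) "" :=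
          hagree m (by omega)
        have hnext : c + (m : Int) * d - d = c + ((m : Int) - 1) * d := by ring
        simp only [rowBack, hsrc, hguard, ne_eq, not_false_iff, if_true, hread, hnext]
        rw [ih hm1 (by omega) f (by omega) _ ?_]
        · -- assemble the write lists
          have hrng : List.range' 1 ((m + 1) - 1) = List.range' 1 (m - 1) ++ [m] := by
            have h1 : (m + 1) - 1 = (m - 1) + 1 := by omega
            rw [h1, List.range'_1_concat]
            have : 1 + (m - 1) = m := by omega
            rw [this]
          rw [hrng, List.reverse_concat, List.map_cons, applyW_cons]
          have hdst2 : c + ((m + 1 : Nat) : Int) * d = c + ((m : Int) + 1) * d := by push_cast; ring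
          rw [hdst2]
        · -- agreement is preserved: the write touched column c+(m+1)*d only
          intro i hi
          have hkey : c + ((m + 1 : Nat) : Int) * d ≠ c + (i : Int) * d :=
            pv_key_ne c d hd (m + 1) i (by omega)
          rw [pv_setD_getD_ne _ _ _ _ _ (hnn (m + 1) (by omega)) (hnn i (by omega)) hkey]
          exact hagree i (by omega)

-- bridges: on a horizontal move everything happens inside row x
theorem bridge_cellA (G : List (List String)) (x : Nat) (j : Int) :
    pvCellA G ((x : Int), j) = PySem.List.pyGetD (G.getD x []) j "" := by
  simp [pvCellA]

theorem bridge_scanA (G : List (List String)) (x : Nat) (d : Int) :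
    ∀ (f : Nat) (j : Int),
      pvScanA G (0, d) f ((x : Int), j) = ((x : Int), rowScanA (G.getD x []) d f j) := by
  intro f
  induction f with
  | zero => intro j; rfl
  | succ f ih =>
      intro j
      simp only [pvScanA, rowScanA, bridge_cellA]
      split
      · simpa using ih (j + d)
      · rfl

theorem pv_getElem?_set_self (G : List (List String)) (x : Nat) (hx : x < G.length) (s : List String) :
    (G.set x s)[x]? = some s := by
  rw [List.getElem?_eq_getElem (by simpa using hx)]
  simp

theorem pv_getD_set_self (G : List (List String)) (x : Nat) (hx : x < G.length) (s : List String) :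
    (G.set x s).getD x [] = s := by
  rw [List.getD_eq_getElem?_getD, pv_getElem?_set_self G x hx s]
  rfl

theorem bridge_setA (G : List (List String)) (x : Nat) (hx : x < G.length) (s : List String)
    (j : Int) (v : String) :
    pvSetA (G.set x s) ((x : Int), j) v = G.set x (PySem.List.pySetD s j v) := by
  simp [pvSetA, List.set_set, pv_getElem?_set_self G x hx s]

theorem bridge_back (G : List (List String)) (x : Nat) (hx : x < G.length) (d rcol : Int) :
    ∀ (f : Nat) (s : List String) (a b : Int),
      pvBackA (0, d) rcol f (G.set x s) ((x : Int), a) ((x : Int), b)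
        = (G.set x (rowBack d rcol f s a b).1,
           (((x : Int), (rowBack d rcol f s a b).2.1), ((x : Int), (rowBack d rcol f s a b).2.2))) := by
  intro f
  induction f with
  | zero => intro s a b; rfl
  | succ f ih =>
      intro s a b
      have hcell : pvCellA (G.set x s) ((x : Int), b) = PySem.List.pyGetD s b "" := by
        rw [bridge_cellA, pv_getD_set_self G x hx s]
      simp only [pvBackA, rowBack, hcell]
      split
      · rw [bridge_setA G x hx s a _]
        simp only [sub_zero]
        rw [ih]
      · rfl

theorem bridge_cellA_set (G : List (List String)) (x : Nat) (hx : x < G.length)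
    (s : List String) (j : Int) :
    pvCellA (G.set x s) ((x : Int), j) = PySem.List.pyGetD s j "" := by
  rw [bridge_cellA, pv_getD_set_self G x hx s]

theorem pv_set_getD_self (G : List (List String)) (x : Nat) (hx : x < G.length) :
    G.set x (G.getD x []) = G := by
  rw [List.getD_eq_getElem?_getD, List.getElem?_eq_getElem (by simpa using hx)]
  exact List.set_getElem_self (by simpa using hx)

theorem bridge_back_start (G : List (List String)) (x : Nat) (hx : x < G.length) (d rcol : Int)
    (f : Nat) (a b : Int) :
    pvBackA (0, d) rcol f G ((x : Int), a) ((x : Int), b)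
      = (G.set x (rowBack d rcol f (G.getD x []) a b).1,
         (((x : Int), (rowBack d rcol f (G.getD x []) a b).2.1),
          ((x : Int), (rowBack d rcol f (G.getD x []) a b).2.2))) := by
  conv_lhs => rw [← pv_set_getD_self G x hx]
  exact bridge_back G x hx d rcol f (G.getD x []) a b

theorem is_box_true_iff (s : String) : is_box s = true ↔ (s = "[" ∨ s = "]") := by
  simp [is_box]

theorem is_box_false_iff (s : String) : is_box s = false ↔ ¬(s = "[" ∨ s = "]") := by
  rw [Bool.eq_false_iff]
  exact not_congr (is_box_true_iff s)

theorem bridge_cellA' (G : List (List String)) (x : Nat) (j : Int) (r : List String)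
    (hr : G.getD x [] = r) : pvCellA G ((x : Int), j) = PySem.List.pyGetD r j "" := by
  rw [bridge_cellA, hr]

theorem bridge_back_start' (G : List (List String)) (x : Nat) (hx : x < G.length) (d rcol : Int)
    (f : Nat) (a b : Int) (r : List String) (hr : G.getD x [] = r) :
    pvBackA (0, d) rcol f G ((x : Int), a) ((x : Int), b)
      = (G.set x (rowBack d rcol f r a b).1,
         (((x : Int), (rowBack d rcol f r a b).2.1),
          ((x : Int), (rowBack d rcol f r a b).2.2))) := by
  rw [bridge_back_start G x hx, hr]

-- B-side bridges (pvCellB/pvSetB mirror pvCellA/pvSetA)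
theorem bridge_cellB (G : List (List String)) (x : Nat) (j : Int) :
    pvCellB G ((x : Int), j) = PySem.List.pyGetD (G.getD x []) j "" := by
  simp [pvCellB]

theorem bridge_cellB' (G : List (List String)) (x : Nat) (j : Int) (r : List String)
    (hr : G.getD x [] = r) : pvCellB G ((x : Int), j) = PySem.List.pyGetD r j "" := by
  rw [bridge_cellB, hr]

theorem bridge_cellB_set (G : List (List String)) (x : Nat) (hx : x < G.length)
    (s : List String) (j : Int) :
    pvCellB (G.set x s) ((x : Int), j) = PySem.List.pyGetD s j "" := by
  rw [bridge_cellB, pv_getD_set_self G x hx s]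

theorem bridge_setB (G : List (List String)) (x : Nat) (hx : x < G.length) (s : List String)
    (j : Int) (v : String) :
    pvSetB (G.set x s) ((x : Int), j) v = G.set x (PySem.List.pySetD s j v) := by
  simp [pvSetB, List.set_set, pv_getElem?_set_self G x hx s]

-- B's recursion fails (without mutating) whenever the chain of boxes ends at a wall;
-- no fuel bound is needed: exhausted fuel also yields (g, false)
theorem pushB_fail (G : List (List String)) (r1 r2 m1 m2 : Int) (k : Nat)
    (hbox : ∀ i : Nat, 1 ≤ i → i < k →
      is_box_alt (pvCellB G (r1 + (i : Int) * m1, r2 + (i : Int) * m2)) = true)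
    (hhash : pvCellB G (r1 + (k : Int) * m1, r2 + (k : Int) * m2) = "#") :
    ∀ (f m : Nat), m < k →
      pvPushB (m1, m2) f G (r1 + (m : Int) * m1, r2 + (m : Int) * m2) = (G, false) := by
  intro f
  induction f with
  | zero => intro m _; rfl
  | succ f ih =>
      intro m hm
      have hpt : (r1 + (m : Int) * m1 + m1, r2 + (m : Int) * m2 + m2)
          = (r1 + ((m + 1 : Nat) : Int) * m1, r2 + ((m + 1 : Nat) : Int) * m2) := by
        rw [Prod.mk.injEq]; constructor <;> (push_cast; ring)
      by_cases hmk : m + 1 = k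
      · simp only [pvPushB, hpt, hmk, hhash]
        simp
      · have hb := hbox (m + 1) (by omega) (by omega)
        have hb' : pvCellB G (r1 + ((m + 1 : Nat) : Int) * m1, r2 + ((m + 1 : Nat) : Int) * m2) = "[" ∨
            pvCellB G (r1 + ((m + 1 : Nat) : Int) * m1, r2 + ((m + 1 : Nat) : Int) * m2) = "]" := by
          simpa [is_box_alt] using hb
        have hrec := ih (m + 1) (by omega)
        rcases hb' with hv | hv <;> simp only [pvPushB, hpt, hv, hrec] <;> simp [is_box_alt]

-- B's recursion succeeds on a horizontal box chain ending at a free cell, and its writes,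
-- performed while unwinding, are the chain-shift writes followed by the '.' at the start
theorem pushB_char (G : List (List String)) (x : Nat) (hx : x < G.length) (ρ : List String)
    (hρ : G.getD x [] = ρ) (c d : Int) (hd : d ≠ 0) (k : Nat)
    (hnn : ∀ i : Nat, i ≤ k → 0 ≤ c + (i : Int) * d)
    (hbox : ∀ i : Nat, 1 ≤ i → i < k → is_box_alt (PySem.List.pyGetD ρ (c + (i : Int) * d) "") = true)
    (htar : is_box_alt (PySem.List.pyGetD ρ (c + (k : Int) * d) "") = false)
    (hhash : ¬ PySem.List.pyGetD ρ (c + (k : Int) * d) "" = "#") :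
    ∀ (f m : Nat), m < k → k - m ≤ f →
      pvPushB (0, d) f G ((x : Int), c + (m : Int) * d)
        = (G.set x (PySem.List.pySetD
            (applyW (((List.range' m (k - m)).reverse).map
              (fun (i : Nat) => (c + ((i : Int) + 1) * d, PySem.List.pyGetD ρ (c + (i : Int) * d) ""))) ρ)
            (c + (m : Int) * d) "."), true) := by
  intro f
  induction f with
  | zero => intro m h1 h2; omega
  | succ f ih =>
      intro m hm hf
      have hpt : ((x : Int) + 0, c + (m : Int) * d + d)
          = ((x : Int), c + ((m + 1 : Nat) : Int) * d) := by
        rw [Prod.mk.injEq]; constructor <;> (push_cast; ring)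
      have hcb := bridge_cellB' G x (c + ((m + 1 : Nat) : Int) * d) ρ hρ
      by_cases hmk : m + 1 = k
      · -- leaf: the next cell is the free target cell
        subst hmk
        have hne : (PySem.List.pyGetD ρ (c + ((m + 1 : Nat) : Int) * d) "" == "#") = false := by
          simpa using hhash
        simp only [pvPushB, hpt, hcb, hne, htar, Bool.false_eq_true, if_false]
        have hGset : G.set x ρ = G := by rw [← hρ]; exact pv_set_getD_self G x hx
        conv_lhs => rw [← hGset]
        rw [bridge_cellB_set G x hx ρ (c + (m : Int) * d),
            bridge_setB G x hx ρ (c + ((m + 1 : Nat) : Int) * d) _]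
        rw [bridge_setB G x hx _ (c + (m : Int) * d) "."]
        have hrng : ((List.range' m ((m + 1) - m)).reverse).map
              (fun (i : Nat) => (c + ((i : Int) + 1) * d, PySem.List.pyGetD ρ (c + (i : Int) * d) ""))
            = [(c + ((m : Int) + 1) * d, PySem.List.pyGetD ρ (c + (m : Int) * d) "")] := by
          have : (m + 1) - m = 1 := by omega
          rw [this, List.range'_one]
          rfl
        rw [hrng]
        have hkey : c + ((m + 1 : Nat) : Int) * d = c + ((m : Int) + 1) * d := by push_cast; ring
        rw [hkey]
        rfl
      · -- interior: the next cell is a box; push it recursively, then move this object onto it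
        have hb := hbox (m + 1) (by omega) (by omega)
        have hb' : PySem.List.pyGetD ρ (c + ((m + 1 : Nat) : Int) * d) "" = "[" ∨
            PySem.List.pyGetD ρ (c + ((m + 1 : Nat) : Int) * d) "" = "]" := by
          simpa [is_box_alt] using hb
        have hrec := ih (m + 1) (by omega) (by omega)
        have hkeys : ∀ w ∈ ((List.range' (m + 1) (k - (m + 1))).reverse).map
            (fun (i : Nat) => (c + ((i : Int) + 1) * d, PySem.List.pyGetD ρ (c + (i : Int) * d) "")),
            0 ≤ w.1 ∧ w.1 ≠ c + (m : Int) * d := by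
          intro w hw
          simp only [List.mem_map, List.mem_reverse, List.mem_range'_1] at hw
          obtain ⟨i, ⟨hi1, hi2⟩, rfl⟩ := hw
          have hcast : c + ((i : Int) + 1) * d = c + ((i + 1 : Nat) : Int) * d := by push_cast; ring
          constructor
          · rw [hcast]; exact hnn (i + 1) (by omega)
          · rw [hcast]; exact pv_key_ne c d hd (i + 1) m (by omega)
        have hread : pvCellB (G.set x (PySem.List.pySetD
              (applyW (((List.range' (m + 1) (k - (m + 1))).reverse).map
                (fun (i : Nat) => (c + ((i : Int) + 1) * d, PySem.List.pyGetD ρ (c + (i : Int) * d) ""))) ρ)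
              (c + ((m + 1 : Nat) : Int) * d) ".")) ((x : Int), c + (m : Int) * d)
            = PySem.List.pyGetD ρ (c + (m : Int) * d) "" := by
          rw [bridge_cellB_set G x hx _ _,
              pv_setD_getD_ne _ _ _ _ _ (hnn (m + 1) (by omega)) (hnn m (by omega))
                (pv_key_ne c d hd (m + 1) m (by omega)),
              getD_applyW_ne _ ρ _ "" (hnn m (by omega)) hkeys]
        rcases hb' with hv | hv <;>
        · simp only [pvPushB, hpt, hcb, hv, hrec]
          simp only [is_box_alt, beq_iff_eq, if_true]
          simp only [show (("[" : String) == "[") = true from rfl,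
                     show (("]" : String) == "[") = false from rfl,
                     show (("]" : String) == "]") = true from rfl,
                     if_true, Bool.false_or]
          rw [hread,
              bridge_setB G x hx _ (c + ((m + 1 : Nat) : Int) * d) _,
              pv_setD_setD_same _ _ _ _ (hnn (m + 1) (by omega)),
              bridge_setB G x hx _ (c + (m : Int) * d) "."]
          have hrng : List.range' m (k - m) = m :: List.range' (m + 1) (k - (m + 1)) := by
            have h1 : k - m = (k - (m + 1)) + 1 := by omega
            rw [h1, List.range'_succ]
          rw [hrng, List.reverse_cons, List.map_append, List.map_cons, List.map_nil,
              applyW_concat]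
          have hkey : c + ((m + 1 : Nat) : Int) * d = c + ((m : Int) + 1) * d := by push_cast; ring
          rw [hkey]
          try rw [if_neg (by decide), if_pos (by decide)]
          try rfl

theorem pv_main_equal (graph : List (List String)) (r_pos move : Int × Int)
    (hpre : PreMain_move_large_box_horizontally graph r_pos move) :
    move_large_box_horizontally graph r_pos move = move_large_box_horizontally_alt graph r_pos move := by
  unfold PreMain_move_large_box_horizontally at hpre
  obtain ⟨r1, c⟩ := r_pos
  obtain ⟨m1, d⟩ := move
  obtain ⟨hm1, hd, hr0, hrlt, hc0, hclt, k, hkb, hk1, hboxes, hkn, hklt, hnb⟩ := hpre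
  dsimp only at hm1 hd hr0 hrlt hc0 hclt hboxes hkn hklt hnb
  subst hm1
  obtain ⟨k', rfl⟩ : ∃ k'', k = k'' + 1 := ⟨k - 1, by omega⟩
  have hx : r1.toNat < graph.length := by omega
  have hr1 : r1 = ((r1.toNat : Nat) : Int) := by omega
  set x : Nat := r1.toNat with hxdef
  rw [hr1]
  set ρ : List String := graph.getD x [] with hρdef
  have hρ : graph.getD x [] = ρ := rfl
  -- hypotheses in loop-friendly form
  have hbox : ∀ i : Nat, 1 ≤ i → i < k' + 1 → is_box (PySem.List.pyGetD ρ (c + (i : Int) * d) "") = true := by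
    intro i h1 h2
    obtain ⟨ha, hb, hv⟩ := hboxes i h2 h1
    rw [pv_getD_toNat _ _ _ ha]
    exact (is_box_true_iff _).mpr hv
  have htar : is_box (PySem.List.pyGetD ρ (c + ((k' + 1 : Nat) : Int) * d) "") = false := by
    rw [pv_getD_toNat _ _ _ hkn]
    exact (is_box_false_iff _).mpr hnb
  have hnn : ∀ i : Nat, i ≤ k' + 1 → 0 ≤ c + (i : Int) * d := by
    intro i hi
    rcases Nat.lt_or_ge i 1 with h0 | h1
    · interval_cases i; simpa using hc0
    · rcases Nat.lt_or_ge i (k' + 1) with h2 | h2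
      · exact (hboxes i h2 h1).1
      · have hik : i = k' + 1 := by omega
        subst hik; exact hkn
  have hflat : ρ.length ≤ graph.flatten.length := pv_row_le_flatten graph x hx
  have hfA : k' + 1 ≤ pvFuelA graph := by unfold pvFuelA; omega
  have hfB : k' + 1 ≤ pvFuelB graph := by unfold pvFuelB; omega
  have hone : c + d = c + ((1 : Nat) : Int) * d := by push_cast; ring
  have hsA : pvScanA graph (0, d) (pvFuelA graph) ((x : Int), c + d)
      = ((x : Int), c + ((k' + 1 : Nat) : Int) * d) := by
    rw [bridge_scanA, hρ, hone,
        scanA_char ρ c d (k' + 1) (by omega) hbox htar (pvFuelA graph) 1 le_rfl (by omega) (by omega)]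
  -- unfold both programs
  simp only [move_large_box_horizontally, move_large_box_horizontally_alt, add_zero, sub_zero]
  rw [hsA]
  rw [bridge_cellA' graph x _ ρ hρ]
  by_cases hhash : PySem.List.pyGetD ρ (c + ((k' + 1 : Nat) : Int) * d) "" = "#"
  · -- wall after the chain: A returns unchanged; B's recursion fails without mutating
    have hboxB : ∀ i : Nat, 1 ≤ i → i < k' + 1 →
        is_box_alt (pvCellB graph ((x : Int) + (i : Int) * 0, c + (i : Int) * d)) = true := by
      intro i h1 h2
      rw [show ((x : Int) + (i : Int) * 0) = (x : Int) from by ring,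
          bridge_cellB' graph x _ ρ hρ]
      exact hbox i h1 h2
    have hhashB : pvCellB graph ((x : Int) + ((k' + 1 : Nat) : Int) * 0, c + ((k' + 1 : Nat) : Int) * d) = "#" := by
      rw [show ((x : Int) + ((k' + 1 : Nat) : Int) * 0) = (x : Int) from by ring,
          bridge_cellB' graph x _ ρ hρ]
      exact hhash
    have hfail := pushB_fail graph (x : Int) c 0 d (k' + 1) hboxB hhashB (pvFuelB graph) 0 (by omega)
    rw [show ((x : Int) + ((0 : Nat) : Int) * 0, c + ((0 : Nat) : Int) * d) = ((x : Int), c) from by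
          rw [Prod.mk.injEq]; constructor <;> (push_cast; ring)] at hfail
    rw [if_pos (by simp only [beq_iff_eq]; exact hhash), hfail]
    rfl
  · rw [if_neg (by simp only [beq_iff_eq]; exact hhash)]
    -- ===== A side =====
    have hsrc2 : c + ((k' + 1 : Nat) : Int) * d - d = c + (((k' + 1 : Nat) : Int) - 1) * d := by ring
    rw [hsrc2, bridge_back_start' graph x hx d c (pvFuelA graph) _ _ ρ hρ,
        back_char ρ c d (k' + 1) hd hnn (k' + 1) (by omega) le_rfl (pvFuelA graph) hfA ρ
          (fun i _ => rfl)]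
    dsimp only
    rw [show ((k' + 1) - 1 : Nat) = k' from by omega]
    have hkeysL : ∀ w ∈ (List.range' 1 k').reverse.map
        (fun (i : Nat) => (c + ((i : Int) + 1) * d, PySem.List.pyGetD ρ (c + (i : Int) * d) "")),
        0 ≤ w.1 ∧ w.1 ≠ c := by
      intro w hw
      simp only [List.mem_map, List.mem_reverse, List.mem_range'_1] at hw
      obtain ⟨i, ⟨hi1, hi2⟩, rfl⟩ := hw
      have hcast : c + ((i : Int) + 1) * d = c + ((i + 1 : Nat) : Int) * d := by push_cast; ring
      constructor
      · rw [hcast]; exact hnn (i + 1) (by omega)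
      · rw [hcast]
        have h := pv_key_ne c d hd (i + 1) 0 (by omega)
        simpa using h
    rw [bridge_cellA_set graph x hx _ c,
        getD_applyW_ne _ ρ c "" hc0 hkeysL,
        bridge_setA graph x hx _ (c + d) _,
        bridge_setA graph x hx _ c "."]
    -- ===== B side =====
    have hboxB : ∀ i : Nat, 1 ≤ i → i < k' + 1 →
        is_box_alt (PySem.List.pyGetD ρ (c + (i : Int) * d) "") = true := fun i h1 h2 => hbox i h1 h2
    have htarB : is_box_alt (PySem.List.pyGetD ρ (c + ((k' + 1 : Nat) : Int) * d) "") = false := htar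
    have hpush := pushB_char graph x hx ρ hρ c d hd (k' + 1) hnn hboxB htarB hhash
      (pvFuelB graph) 0 (by omega) (by omega)
    rw [show ((x : Int), c + ((0 : Nat) : Int) * d) = ((x : Int), c) from by
          rw [Prod.mk.injEq]; constructor <;> (push_cast; ring)] at hpush
    rw [hpush]
    dsimp only
    -- decompose the write list: range' 0 (k'+1) = 0 :: range' 1 k'
    have hrng : List.range' 0 ((k' + 1) - 0) = 0 :: List.range' 1 k' := by
      rw [show (k' + 1) - 0 = k' + 1 from rfl, List.range'_succ]
    rw [hrng, List.reverse_cons, List.map_append, List.map_cons, List.map_nil, applyW_concat]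
    have hk0 : c + ((0 : Nat) : Int) * d = c := by push_cast; ring
    have hk1' : c + (((0 : Nat) : Int) + 1) * d = c + d := by push_cast; ring
    rw [show (c + (((0 : Nat) : Int) + 1) * d, PySem.List.pyGetD ρ (c + ((0 : Nat) : Int) * d) "")
          = (c + d, PySem.List.pyGetD ρ c "") from by rw [Prod.mk.injEq]; exact ⟨hk1', by rw [hk0]⟩,
        hk0]
    rfl

theorem pv_immediate (graph : List (List String)) (r_pos move : Int × Int)
    (h : PreImm_move_large_box_horizontally graph r_pos move) :
    move_large_box_horizontally graph r_pos move = move_large_box_horizontally_alt graph r_pos move := by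
  unfold PreImm_move_large_box_horizontally at h
  obtain ⟨r1, r2⟩ := r_pos
  obtain ⟨m1, m2⟩ := move
  obtain ⟨-, -, -, -, hnb', -⟩ := h
  dsimp only at hnb'
  have hnb : is_box (pvCellA graph (r1 + m1, r2 + m2)) = false := (is_box_false_iff _).mpr hnb'
  have hnbB : is_box_alt (pvCellB graph (r1 + m1, r2 + m2)) = false := hnb
  have hscan : pvScanA graph (m1, m2) (pvFuelA graph) (r1 + m1, r2 + m2) = (r1 + m1, r2 + m2) := by
    rw [show pvFuelA graph = (graph.flatten.length + graph.length) + 1 from rfl]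
    simp only [pvScanA, hnb, Bool.false_eq_true, if_false]
  by_cases hhash : pvCellA graph (r1 + m1, r2 + m2) = "#"
  · have hA : move_large_box_horizontally graph (r1, r2) (m1, m2) = (graph, (r1, r2)) := by
      simp only [move_large_box_horizontally, hscan]
      rw [if_pos (by simp only [beq_iff_eq]; exact hhash)]
    have hstep : pvPushB (m1, m2) (pvFuelB graph) graph (r1, r2) = (graph, false) := by
      rw [show pvFuelB graph = (graph.flatten.length + graph.length) + 1 from rfl]
      simp only [pvPushB]
      rw [if_pos (by simp only [beq_iff_eq]; exact hhash)]
    have hB : move_large_box_horizontally_alt graph (r1, r2) (m1, m2) = (graph, (r1, r2)) := by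
      simp only [move_large_box_horizontally_alt, hstep]
      rfl
    rw [hA, hB]
  · have hA : move_large_box_horizontally graph (r1, r2) (m1, m2)
        = (pvSetA (pvSetA graph (r1 + m1, r2 + m2) (pvCellA graph (r1, r2))) (r1, r2) ".",
           (r1 + m1, r2 + m2)) := by
      simp only [move_large_box_horizontally, hscan]
      rw [if_neg (by simp only [beq_iff_eq]; exact hhash)]
      rw [show pvFuelA graph = (graph.flatten.length + graph.length) + 1 from rfl]
      simp only [pvBackA, add_sub_cancel_right, ne_eq, not_true_eq_false, if_false]
    have hstep : pvPushB (m1, m2) (pvFuelB graph) graph (r1, r2)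
        = (pvSetB (pvSetB graph (r1 + m1, r2 + m2) (pvCellB graph (r1, r2))) (r1, r2) ".", true) := by
      rw [show pvFuelB graph = (graph.flatten.length + graph.length) + 1 from rfl]
      simp only [pvPushB]
      rw [if_neg (by simp only [beq_iff_eq]; exact hhash)]
      simp only [hnbB, Bool.false_eq_true, if_false]
    have hB : move_large_box_horizontally_alt graph (r1, r2) (m1, m2)
        = (pvSetB (pvSetB graph (r1 + m1, r2 + m2) (pvCellB graph (r1, r2))) (r1, r2) ".",
           (r1 + m1, r2 + m2)) := by
      simp only [move_large_box_horizontally_alt, hstep]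
      rfl
    rw [hA, hB]
    rfl

-- A's scan characterisation for a general move vector (wall case)
theorem scan2A_char (G : List (List String)) (r1 r2 m1 m2 : Int) (k : Nat)
    (hbox : ∀ i : Nat, 1 ≤ i → i < k →
      is_box (pvCellA G (r1 + (i : Int) * m1, r2 + (i : Int) * m2)) = true)
    (htar : is_box (pvCellA G (r1 + (k : Int) * m1, r2 + (k : Int) * m2)) = false) :
    ∀ (f m : Nat), 1 ≤ m → m ≤ k → k - m < f →
      pvScanA G (m1, m2) f (r1 + (m : Int) * m1, r2 + (m : Int) * m2)
        = (r1 + (k : Int) * m1, r2 + (k : Int) * m2) := by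
  intro f
  induction f with
  | zero => intro m _ _ h; omega
  | succ f ih =>
      intro m h1 h2 h3
      by_cases hm : m = k
      · subst hm; simp [pvScanA, htar]
      · have hbm := hbox m h1 (by omega)
        have hs1 : r1 + (m : Int) * m1 + m1 = r1 + ((m + 1 : Nat) : Int) * m1 := by push_cast; ring
        have hs2 : r2 + (m : Int) * m2 + m2 = r2 + ((m + 1 : Nat) : Int) * m2 := by push_cast; ring
        simp only [pvScanA, hbm, if_true]
        rw [hs1, hs2]
        exact ih (m + 1) (by omega) (by omega) (by omega)

theorem pv_wall (graph : List (List String)) (r_pos move : Int × Int)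
    (h : PreWall_move_large_box_horizontally graph r_pos move) :
    move_large_box_horizontally graph r_pos move = move_large_box_horizontally_alt graph r_pos move := by
  unfold PreWall_move_large_box_horizontally at h
  obtain ⟨r1, r2⟩ := r_pos
  obtain ⟨m1, m2⟩ := move
  obtain ⟨k, hkb, hk1, hbox', -, hhash⟩ := h
  dsimp only at hkb hbox' hhash
  have hbox : ∀ i : Nat, 1 ≤ i → i < k →
      is_box (pvCellA graph (r1 + (i : Int) * m1, r2 + (i : Int) * m2)) = true := by
    intro i h1 h2
    exact (is_box_true_iff _).mpr (hbox' i h2 h1).2.2.2.2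
  have htar : is_box (pvCellA graph (r1 + (k : Int) * m1, r2 + (k : Int) * m2)) = false := by
    refine (is_box_false_iff _).mpr ?_
    show ¬(PySem.List.pyGetD (PySem.List.pyGetD graph (r1 + (k : Int) * m1) []) (r2 + (k : Int) * m2) "" = "[" ∨
           PySem.List.pyGetD (PySem.List.pyGetD graph (r1 + (k : Int) * m1) []) (r2 + (k : Int) * m2) "" = "]")
    rw [hhash]
    simp
  have hpair1 : r1 + m1 = r1 + ((1 : Nat) : Int) * m1 := by push_cast; ring
  have hpair2 : r2 + m2 = r2 + ((1 : Nat) : Int) * m2 := by push_cast; ring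
  have hfA : k - 1 < pvFuelA graph := by unfold pvFuelA; omega
  have hsA := scan2A_char graph r1 r2 m1 m2 k hbox htar (pvFuelA graph) 1 le_rfl hk1 hfA
  have hcellA : pvCellA graph (r1 + (k : Int) * m1, r2 + (k : Int) * m2) = "#" := hhash
  have hboxB : ∀ i : Nat, 1 ≤ i → i < k →
      is_box_alt (pvCellB graph (r1 + (i : Int) * m1, r2 + (i : Int) * m2)) = true := fun i h1 h2 => hbox i h1 h2
  have hfail := pushB_fail graph r1 r2 m1 m2 k hboxB hhash (pvFuelB graph) 0 (by omega)
  rw [show (r1 + ((0 : Nat) : Int) * m1, r2 + ((0 : Nat) : Int) * m2) = (r1, r2) from by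
        rw [Prod.mk.injEq]; constructor <;> (push_cast; ring)] at hfail
  simp only [move_large_box_horizontally, move_large_box_horizontally_alt]
  rw [hpair1, hpair2, hsA, hcellA, hfail]
  rw [if_pos (by simp)]
  rfl

-- ===== VERDICT (by name: the statement is the Claim_ definition above) =====
theorem move_large_box_horizontally_spec : Claim_equal_move_large_box_horizontally := by
  intro graph r_pos move _ hpre
  unfold Spec_move_large_box_horizontally
  rcases hpre with himm | hwall | hmain
  · exact (pv_immediate graph r_pos move himm).symm ▸ rfl
  · exact pv_wall graph r_pos move hwall
  · exact pv_main_equal graph r_pos move hmain
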